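-- pv_equiv track=rewrite | github.com/yyuting/Adelta | util/compiler_util.py | replace_line
-- ===== SOURCE A (Python) =====
-- def replace_line(s, start, replace):
--     """
--     Given a text file str s, match a line starting with the string start and replace it with replace.
--     """
--     lines = s.split('\n')
--     found = False
--     for i in range(len(lines)):
--         if lines[i].startswith(start):
--             lines[i] = replace
--             found = True
--             break
--     if not found:
--         raise ValueError('could not match string %s' % start)
--     return '\n'.join(lines)
-- ===== SOURCE B (Python) =====
-- def replace_line(s, start, replace):
--     """
--     Given a text file str s, match a line starting with the string start and replace it with replace.
--     """
--     head, sep, tail = s.partition('\n')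
--     if head.startswith(start):
--         return replace + sep + tail
--     if not sep:
--         raise ValueError('could not match string %s' % start)
--     return head + '\n' + replace_line(tail, start, replace)
-- ===== Notes on version B (the rewrite author's own statement) =====
-- stated objective: simpler
-- what changed: Replaces the split-into-list / indexed loop with flag / join pipeline by a direct recursion on the string: partition off the first line, replace it if it matches, otherwise recurse on the rest, never materialising a list of lines.
import Mathlib
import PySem

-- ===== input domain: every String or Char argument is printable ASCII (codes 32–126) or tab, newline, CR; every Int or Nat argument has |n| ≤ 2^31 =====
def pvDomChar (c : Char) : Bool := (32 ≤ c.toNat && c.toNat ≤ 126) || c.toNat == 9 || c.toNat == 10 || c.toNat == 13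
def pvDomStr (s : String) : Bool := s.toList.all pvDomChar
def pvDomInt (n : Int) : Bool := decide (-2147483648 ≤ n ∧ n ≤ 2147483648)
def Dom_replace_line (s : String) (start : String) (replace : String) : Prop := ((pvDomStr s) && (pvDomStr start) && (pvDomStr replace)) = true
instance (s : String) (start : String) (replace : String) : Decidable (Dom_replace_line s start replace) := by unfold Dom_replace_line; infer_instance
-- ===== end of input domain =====

-- B replaces A's split-into-list / indexed loop with flag / join pipeline by a direct
-- recursion on the string (partition off the first line, recurse on the rest); simpler,
-- same cost, same values wherever A returns.

-- ===== PORT A =====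
-- A's indexed for-loop with `found`/`break`: replace the FIRST line starting with `start`;
-- none = the loop ended with found = False (Python raises ValueError there).
def pvFindRepl (start repl : List Char) : List (List Char) → Option (List (List Char))
  | [] => none
  | l :: ls =>
    if PySem.Chars.startswith l start then some (repl :: ls)
    else (pvFindRepl start repl ls).map (l :: ·)

def replace_line (s : String) (start : String) (replace : String) : String :=
  let lines := PySem.Chars.splitOn s.toList ['\n']          -- s.split('\n')
  match pvFindRepl start.toList replace.toList lines with
  | some lines' => String.ofList (PySem.Chars.join ['\n'] lines')  -- '\n'.join(lines)
  | none => ""                                              -- Python raises ValueError: outside Pre_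

-- ===== PORT B =====
-- Source B's recursion: head, sep, tail = s.partition('\n') — head is ported exactly as
-- takeWhile (≠ '\n') (partition at the FIRST newline); `sep` nonempty iff head is a
-- proper prefix.  none = ValueError (outside Pre_).
def pvAltGo (start repl : List Char) (cs : List Char) : Option (List Char) :=
  let head := cs.takeWhile (· != '\n')
  if PySem.Chars.startswith head start then
    some (repl ++ cs.drop head.length)                      -- replace + sep + tail
  else if cs.length ≤ head.length then none                 -- not sep: raise ValueError
  else (pvAltGo start repl (cs.drop (head.length + 1))).map (fun r => head ++ '\n' :: r)
termination_by cs.length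
decreasing_by simp; omega

def replace_line_alt (s : String) (start : String) (replace : String) : String :=
  match pvAltGo start.toList replace.toList s.toList with
  | some r => String.ofList r
  | none => ""

-- ===== PRECONDITION & SPEC =====
-- Pre_ excludes exactly the inputs where no line of s starts with `start`: there Python A
-- (and Python B) raise ValueError.
def Pre_replace_line (s : String) (start : String) (replace : String) : Prop :=
  ∃ l ∈ PySem.Chars.splitOn s.toList ['\n'], PySem.Chars.startswith l start.toList = true

instance (s : String) (start : String) (replace : String) : Decidable (Pre_replace_line s start replace) := by unfold Pre_replace_line; infer_instance

def pvWitness_replace_line : String × String × String := ("ab\ncd\nef", "cd", "XY")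

def Spec_replace_line (s : String) (start : String) (replace : String) (out : String) : Prop := out = replace_line_alt s start replace
instance (s : String) (start : String) (replace : String) (out : String) : Decidable (Spec_replace_line s start replace out) := by unfold Spec_replace_line; infer_instance

-- ===== CLAIM (what is proved, stated in full; the proofs are below) =====
def Claim_equal_replace_line : Prop := ∀ (s : String) (start : String) (replace : String), Dom_replace_line s start replace → Pre_replace_line s start replace → Spec_replace_line s start replace (replace_line s start replace)

-- ===== LEMMAS AND PROOFS =====

-- reference split of a char list at newlines
def pvSplitNl : List Char → List (List Char)
  | [] => [[]]
  | c :: rest =>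
    if c = '\n' then [] :: pvSplitNl rest
    else
      match pvSplitNl rest with
      | [] => [[c]]
      | p :: ps => (c :: p) :: ps

def pvGlue (pre : List Char) : List (List Char) → List (List Char)
  | [] => [pre]
  | p :: ps => (pre ++ p) :: ps

theorem pvSplitNl_ne_nil (cs : List Char) : pvSplitNl cs ≠ [] := by
  cases cs with
  | nil => simp [pvSplitNl]
  | cons c rest =>
    simp only [pvSplitNl]
    split_ifs
    · simp
    · cases pvSplitNl rest <;> simp

theorem pvSplitOn_go (fuel : Nat) (l cur : List Char) (acc : List (List Char))
    (h : l.length < fuel) :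
    PySem.Chars.splitOn.go ['\n'] fuel l cur acc = acc.reverse ++ pvGlue cur.reverse (pvSplitNl l) := by
  induction fuel generalizing l cur acc with
  | zero => omega
  | succ f ih =>
    cases l with
    | nil => simp [PySem.Chars.splitOn.go, pvSplitNl, pvGlue]
    | cons c rest =>
      by_cases hc : c = '\n'
      · subst hc
        have hp : List.isPrefixOf ['\n'] ('\n' :: rest) = true := by simp [List.isPrefixOf]
        simp only [PySem.Chars.splitOn.go, hp, if_pos]
        have hdr : List.drop (['\n'].length) ('\n' :: rest) = rest := rfl
        rw [hdr, ih rest [] ((cur.reverse) :: acc) (by simpa using Nat.lt_of_succ_lt_succ (by simpa using h))]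
        rcases hsp : pvSplitNl rest with _ | ⟨p, ps⟩
        · exact absurd hsp (pvSplitNl_ne_nil rest)
        · simp [pvSplitNl, pvGlue, hsp]
      · have hp : List.isPrefixOf ['\n'] (c :: rest) = false := by
          simp [List.isPrefixOf]; exact fun hh => (hc hh.symm).elim
        simp only [PySem.Chars.splitOn.go, hp]
        rw [if_neg (by simp [hp])]
        rw [ih rest (c :: cur) acc (by simpa using Nat.lt_of_succ_lt_succ (by simpa using h))]
        simp only [pvSplitNl, if_neg hc]
        rcases hsp : pvSplitNl rest with _ | ⟨p, ps⟩
        · exact absurd hsp (pvSplitNl_ne_nil rest)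
        · simp [pvGlue]

theorem pvSplitOn_newline (cs : List Char) :
    PySem.Chars.splitOn cs ['\n'] = pvSplitNl cs := by
  rw [PySem.Chars.splitOn, pvSplitOn_go (cs.length + 1) cs [] [] (by omega)]
  rcases hsp : pvSplitNl cs with _ | ⟨p, ps⟩
  · exact absurd hsp (pvSplitNl_ne_nil cs)
  · simp [pvGlue]

theorem pvJoin_splitNl (l : List Char) : PySem.Chars.join ['\n'] (pvSplitNl l) = l := by
  induction l with
  | nil => simp [pvSplitNl, PySem.Chars.join_singleton]
  | cons c rest ih =>
    simp only [pvSplitNl]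
    by_cases hc : c = '\n'
    · subst hc
      rw [if_pos rfl]
      rcases hsp : pvSplitNl rest with _ | ⟨p, ps⟩
      · exact absurd hsp (pvSplitNl_ne_nil rest)
      · rw [hsp] at ih
        rw [PySem.Chars.join_cons_cons, ih]
        simp
    · rw [if_neg hc]
      rcases hsp : pvSplitNl rest with _ | ⟨p, ps⟩
      · exact absurd hsp (pvSplitNl_ne_nil rest)
      · rw [hsp] at ih
        cases ps with
        | nil =>
          simp only [PySem.Chars.join_singleton] at ih ⊢
          simp [ih]
        | cons q qs =>
          rw [PySem.Chars.join_cons_cons] at ih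
          rw [PySem.Chars.join_cons_cons]
          simp at ih ⊢
          simp [ih]

theorem pvSplitNl_structure (cs : List Char) (h : '\n' ∈ cs) :
    pvSplitNl cs = cs.takeWhile (· != '\n') ::
      pvSplitNl (cs.drop ((cs.takeWhile (· != '\n')).length + 1)) := by
  induction cs with
  | nil => simp at h
  | cons c rest ih =>
    by_cases hc : c = '\n'
    · subst hc
      simp [pvSplitNl]
    · have hm : '\n' ∈ rest := by
        rcases List.mem_cons.mp h with h | h
        · exact absurd h.symm hc
        · exact h
      simp only [pvSplitNl, if_neg hc]
      rw [ih hm]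
      have hb : (c != '\n') = true := by simpa using hc
      simp [List.takeWhile_cons, hb]

theorem pvTakeWhile_all (cs : List Char) (h : '\n' ∉ cs) :
    cs.takeWhile (· != '\n') = cs := by
  induction cs with
  | nil => rfl
  | cons c rest ih =>
    have hc : c ≠ '\n' := fun hh => h (by simp [hh])
    have hb : (c != '\n') = true := by simpa using hc
    simp [List.takeWhile_cons, hb, ih (fun hh => h (by simp [hh]))]

theorem pvDrop_tw (cs : List Char) (h : '\n' ∈ cs) :
    cs.drop ((cs.takeWhile (· != '\n')).length) =
      '\n' :: cs.drop ((cs.takeWhile (· != '\n')).length + 1) := by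
  induction cs with
  | nil => simp at h
  | cons c rest ih =>
    by_cases hc : c = '\n'
    · subst hc; simp
    · have hm : '\n' ∈ rest := by
        rcases List.mem_cons.mp h with h | h
        · exact absurd h.symm hc
        · exact h
      have hb : (c != '\n') = true := by simpa using hc
      simpa [List.takeWhile_cons, hb] using ih hm

theorem pvTw_lt (cs : List Char) (h : '\n' ∈ cs) :
    (cs.takeWhile (· != '\n')).length < cs.length := by
  induction cs with
  | nil => simp at h
  | cons c rest ih =>
    by_cases hc : c = '\n'
    · subst hc; simp
    · have hm : '\n' ∈ rest := by
        rcases List.mem_cons.mp h with h | h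
        · exact absurd h.symm hc
        · exact h
      have hb : (c != '\n') = true := by simpa using hc
      simpa [List.takeWhile_cons, hb, Nat.succ_lt_succ_iff] using ih hm

theorem pvFindRepl_some_ne_nil (st rp : List Char) (ls ls' : List (List Char))
    (h : pvFindRepl st rp ls = some ls') : ls' ≠ [] := by
  induction ls generalizing ls' with
  | nil => simp [pvFindRepl] at h
  | cons l t ih =>
    simp only [pvFindRepl] at h
    split_ifs at h
    · cases h; simp
    · rcases Option.map_eq_some_iff.mp h with ⟨w, hw, rfl⟩
      simp

theorem pvSplitNl_no_nl (cs : List Char) (h : '\n' ∉ cs) : pvSplitNl cs = [cs] := by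
  induction cs with
  | nil => rfl
  | cons c rest ih =>
    have hc : c ≠ '\n' := fun hh => h (by simp [hh])
    have hmr : '\n' ∉ rest := fun hh => h (by simp [hh])
    simp only [pvSplitNl, if_neg hc, ih hmr]

theorem pvMain (st rp : List Char) (n : Nat) :
    ∀ cs : List Char, cs.length ≤ n →
      (pvFindRepl st rp (pvSplitNl cs)).map (PySem.Chars.join ['\n']) = pvAltGo st rp cs := by
  induction n with
  | zero =>
    intro cs hcs
    have : cs = [] := List.length_eq_zero_iff.mp (Nat.le_zero.mp hcs)
    subst this
    rw [pvAltGo]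
    simp only [pvSplitNl, pvFindRepl, List.takeWhile_nil]
    split_ifs <;> simp_all [PySem.Chars.join_singleton]
  | succ n ih =>
    intro cs hcs
    by_cases hm : '\n' ∈ cs
    · have hstr := pvSplitNl_structure cs hm
      set head := cs.takeWhile (· != '\n') with hhead
      set rest := cs.drop (head.length + 1) with hrest
      have hlt : head.length < cs.length := pvTw_lt cs hm
      have hrlen : rest.length ≤ n := by
        rw [hrest]; simp; omega
      rw [pvAltGo]
      simp only [← hhead, ← hrest]
      rw [hstr]
      simp only [pvFindRepl]
      by_cases hs : PySem.Chars.startswith head st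
      · rw [if_pos hs, if_pos hs]
        have hdrop : cs.drop head.length = '\n' :: rest := pvDrop_tw cs hm
        rcases hq : pvSplitNl rest with _ | ⟨q, qs⟩
        · exact absurd hq (pvSplitNl_ne_nil rest)
        · have hjr : PySem.Chars.join ['\n'] (q :: qs) = rest := by
            rw [← hq, pvJoin_splitNl]
          simp only [Option.map_some]
          rw [PySem.Chars.join_cons_cons, hjr, hdrop]
          simp
      · rw [if_neg hs, if_neg hs, if_neg (by omega)]
        rw [← ih rest hrlen]
        cases hfr : pvFindRepl st rp (pvSplitNl rest) with
        | none => simp [hfr]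
        | some ls' =>
          rcases hls' : ls' with _ | ⟨q, qs⟩
          · exact absurd rfl (hls' ▸ pvFindRepl_some_ne_nil st rp _ _ hfr)
          · simp only [hfr, Option.map_some]
            rw [PySem.Chars.join_cons_cons]
            simp
    · have htw : cs.takeWhile (· != '\n') = cs := pvTakeWhile_all cs hm
      have hspl : pvSplitNl cs = [cs] := pvSplitNl_no_nl cs hm
      rw [pvAltGo]
      simp only [htw, hspl, pvFindRepl]
      split_ifs with hs h2
      · simp [PySem.Chars.join_singleton, List.drop_length]
      · simp
      · omega

theorem pvPortsEq (s start replace : String) :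
    replace_line s start replace = replace_line_alt s start replace := by
  unfold replace_line replace_line_alt
  rw [pvSplitOn_newline]
  have h := pvMain start.toList replace.toList s.toList.length s.toList (le_refl _)
  cases hfr : pvFindRepl start.toList replace.toList (pvSplitNl s.toList) with
  | none => rw [hfr] at h; simp at h; rw [← h]; simp [pvSplitOn_newline, hfr]
  | some ls => rw [hfr] at h; simp at h; rw [← h]; simp [pvSplitOn_newline, hfr]

-- ===== VERDICT (by name: the statement is the Claim_ definition above) =====
theorem replace_line_spec : Claim_equal_replace_line := by
  intro s start replace _ _
  unfold Spec_replace_line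
  exact pvPortsEq s start replace
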